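-- pv_equiv track=rewrite | github.com/luisestrellar/esp32-sram-puf-authentication | tools/puf-challenge-generator/pufchallenge.py | find_stable_bits
-- ===== SOURCE A (Python) =====
-- def hex_to_binary(hex_str):
--     """Converts a hex string to a binary string"""
--     return bin(int(hex_str, 16))[2:].zfill(len(hex_str) * 4)
--
-- def find_stable_bits(hex_codes):
--     """
--     Identifies stable bits across all measurements.
--     A bit is stable if it doesn't change between consecutive measurements.
--     Returns a binary string where '1' = stable bit, '0' = unstable bit
--     """
--     if len(hex_codes) < 2:
--         raise ValueError("Need at least 2 measurements to identify stable bits")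
--
--     # Convert hex codes to binary
--     binary_codes = [hex_to_binary(code) for code in hex_codes]
--
--     # Ensure all measurements are the same length
--     min_length = min(len(code) for code in binary_codes)
--     binary_codes = [code[:min_length] for code in binary_codes]
--
--     # Initialize a list to track changes in each bit position
--     bit_changes = [0] * len(binary_codes[0])
--
--     # Compare each bit to the corresponding bit in the next code
--     for i in range(len(binary_codes) - 1):
--         for bit_pos in range(len(binary_codes[i])):
--             if binary_codes[i][bit_pos] != binary_codes[i+1][bit_pos]:
--                 bit_changes[bit_pos] = 1
--
--     # Construct the challenge: '1' = stable bit, '0' = unstable bit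
--     stable_bits = ''.join(['1' if x == 0 else '0' for x in bit_changes])
--
--     return stable_bits
-- ===== SOURCE B (Python) =====
-- def hex_to_binary(hex_str):
--     """Converts a hex string to a binary string"""
--     return bin(int(hex_str, 16))[2:].zfill(len(hex_str) * 4)
--
-- def find_stable_bits(hex_codes):
--     """Column-wise re-implementation: transpose the truncated binary strings and
--     mark a position stable ('1') iff its whole column is one single character."""
--     if len(hex_codes) < 2:
--         raise ValueError("Need at least 2 measurements to identify stable bits")
--     binary_codes = [hex_to_binary(code) for code in hex_codes]
--     min_length = min(len(code) for code in binary_codes)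
--     columns = zip(*(code[:min_length] for code in binary_codes))
--     return ''.join('1' if len(set(col)) == 1 else '0' for col in columns)
-- ===== Notes on version B (the rewrite author's own statement) =====
-- stated objective: simpler
-- what changed: A scans consecutive row pairs while mutating a bit_changes array of flags; B transposes the truncated binary strings and marks a position stable iff its whole column is a single character (len(set(col)) == 1), removing the mutable flag array and the pairwise scan.
import Mathlib
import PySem

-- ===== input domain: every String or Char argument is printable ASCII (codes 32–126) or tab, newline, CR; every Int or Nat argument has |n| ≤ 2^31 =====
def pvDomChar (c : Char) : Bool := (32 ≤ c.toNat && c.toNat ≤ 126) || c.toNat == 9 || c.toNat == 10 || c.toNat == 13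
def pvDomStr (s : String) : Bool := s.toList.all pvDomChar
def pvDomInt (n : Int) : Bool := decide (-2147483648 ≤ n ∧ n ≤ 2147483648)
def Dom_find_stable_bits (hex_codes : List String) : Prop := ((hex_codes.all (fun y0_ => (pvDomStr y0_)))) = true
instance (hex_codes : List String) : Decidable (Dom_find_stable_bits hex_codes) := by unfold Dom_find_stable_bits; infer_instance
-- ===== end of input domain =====

-- B replaces A's consecutive-row-pair scan (with a mutable bit_changes array) by a
-- column-wise uniformity test over the transposed binary strings; objective: simpler.


-- ===== PORT A =====
-- hex_to_binary: bin(int(hex_str,16))[2:].zfill(len(hex_str)*4), on code points.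
-- int(s,16) → PySem.Int.ofStrBase?; it is some under Pre_ (.getD 0 only fires where Python raised,
-- outside Pre_); bin → PySem.Int.toBinChars0b; [2:] with the literal nonneg bound 2 = List.drop 2.
def hex_to_binary (hex_str : String) : List Char :=
  PySem.Chars.zfill ((PySem.Int.toBinChars0b ((PySem.Int.ofStrBase? hex_str 16).getD 0)).drop 2)
    ((hex_str.toList.length * 4 : Nat) : Int)

-- find_stable_bits: the guard (Python raises ValueError there; excluded by Pre_, "" is junk),
-- min(...) over a nonempty list → List.min? (getD unreachable under the guard),
-- code[:min_length] with a nonneg bound = take, range(k) over nonneg = List.range k,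
-- in-range list indexing = getD, ''.join over single chars = String.ofList.
def find_stable_bits (hex_codes : List String) : String :=
  if hex_codes.length < 2 then ""
  else
    let binary_codes := hex_codes.map hex_to_binary
    let min_length : Nat := ((binary_codes.map List.length).min?).getD 0
    let binary_codes2 := binary_codes.map (fun code => code.take min_length)
    let bit_changes : List Int :=
      (List.range (binary_codes2.length - 1)).foldl
        (fun bc i =>
          (List.range (binary_codes2.getD i []).length).foldl
            (fun bc2 bit_pos =>
              if (binary_codes2.getD i []).getD bit_pos ' ' ≠ (binary_codes2.getD (i+1) []).getD bit_pos ' '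
              then bc2.set bit_pos 1 else bc2)
            bc)
        (List.replicate (binary_codes2.getD 0 []).length (0 : Int))
    String.ofList (bit_changes.map (fun x => if x = 0 then '1' else '0'))

-- ===== PORT B =====
-- zip(*(code[:min_length] for code in binary_codes)): every truncated row has exactly
-- min_length chars (min ≤ each length), so the transposition has exactly min_length columns,
-- column j holding each row's j-th char — exact; len(set(col)) → PySem.Set.len ∘ PySem.Set.ofList.
def find_stable_bits_alt (hex_codes : List String) : String :=
  if hex_codes.length < 2 then ""
  else
    let binary_codes := hex_codes.map hex_to_binary
    let min_length : Nat := ((binary_codes.map List.length).min?).getD 0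
    let columns := (List.range min_length).map
      (fun j => binary_codes.map (fun code => (code.take min_length).getD j ' '))
    String.ofList (columns.map (fun col => if PySem.Set.len (PySem.Set.ofList col) = 1 then '1' else '0'))

-- ===== PRECONDITION & SPEC =====
-- Pre_ excludes exactly the inputs where Python A raises: fewer than 2 measurements
-- (ValueError from the guard) or a string int(s,16) rejects (ValueError).
def Pre_find_stable_bits (hex_codes : List String) : Prop :=
  2 ≤ hex_codes.length ∧ ∀ s ∈ hex_codes, (PySem.Int.ofStrBase? s 16).isSome = true
instance (hex_codes : List String) : Decidable (Pre_find_stable_bits hex_codes) := by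
  unfold Pre_find_stable_bits; infer_instance
def pvWitness_find_stable_bits : List String := ["3a", "2b"]
def Spec_find_stable_bits (hex_codes : List String) (out : String) : Prop := out = find_stable_bits_alt hex_codes
instance (hex_codes : List String) (out : String) : Decidable (Spec_find_stable_bits hex_codes out) := by unfold Spec_find_stable_bits; infer_instance

-- ===== CLAIM (what is proved, stated in full; the proofs are below) =====
def Claim_equal_find_stable_bits : Prop := ∀ (hex_codes : List String), Dom_find_stable_bits hex_codes → Pre_find_stable_bits hex_codes → Spec_find_stable_bits hex_codes (find_stable_bits hex_codes)

-- ===== LEMMAS AND PROOFS =====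

-- Inner loop of A: setting positions bit_pos < k of bc to 1 whenever p bit_pos holds.
theorem inner_length (p : Nat → Prop) [DecidablePred p] (k : Nat) (bc : List Int) :
    (((List.range k).foldl (fun bc2 bit_pos => if p bit_pos then bc2.set bit_pos 1 else bc2) bc)).length =
      bc.length := by
  induction k generalizing bc with
  | zero => simp
  | succ k ih =>
    rw [List.range_succ, List.foldl_append]
    simp only [List.foldl_cons, List.foldl_nil]
    split <;> simp [ih]

theorem inner_getElem? (p : Nat → Prop) [DecidablePred p] (k : Nat) (bc : List Int) (j : Nat) :
    (((List.range k).foldl (fun bc2 bit_pos => if p bit_pos then bc2.set bit_pos 1 else bc2) bc))[j]? =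
      if j < k ∧ p j then (if j < bc.length then some 1 else none) else bc[j]? := by
  induction k with
  | zero => simp
  | succ k ih =>
    rw [List.range_succ, List.foldl_append]
    simp only [List.foldl_cons, List.foldl_nil]
    have hL : (((List.range k).foldl (fun bc2 bit_pos => if p bit_pos then bc2.set bit_pos 1 else bc2) bc)).length = bc.length :=
      inner_length p k bc
    by_cases hpk : p k
    · rw [if_pos hpk, List.getElem?_set, hL]
      by_cases hjk : k = j
      · subst hjk
        rw [if_pos rfl, if_pos (And.intro (Nat.lt_succ_self k) hpk)]
      · rw [if_neg hjk, ih]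
        by_cases h1 : j < k ∧ p j
        · rw [if_pos h1, if_pos (And.intro (by omega) h1.2)]
        · rw [if_neg h1, if_neg (by rintro ⟨h2, h3⟩; exact h1 ⟨by omega, h3⟩)]
    · rw [if_neg hpk, ih]
      by_cases h1 : j < k ∧ p j
      · rw [if_pos h1, if_pos (And.intro (by omega) h1.2)]
      · have hnot : ¬ (j < k + 1 ∧ p j) := by
          rintro ⟨h2, h3⟩
          rcases Nat.lt_succ_iff_lt_or_eq.mp h2 with h | h
          · exact h1 ⟨h, h3⟩
          · exact hpk (h ▸ h3)
        rw [if_neg h1, if_neg hnot]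

-- Outer loop of A over adjacent row pairs.
theorem outer_length (d : Nat → Nat → Prop) [∀ i j, Decidable (d i j)]
    (len : Nat → Nat) (t : Nat) (bc : List Int) :
    (((List.range t).foldl
        (fun bc i => (List.range (len i)).foldl
          (fun bc2 bit_pos => if d i bit_pos then bc2.set bit_pos 1 else bc2) bc)
        bc)).length = bc.length := by
  induction t generalizing bc with
  | zero => simp
  | succ t ih =>
    rw [List.range_succ, List.foldl_append]
    simp only [List.foldl_cons, List.foldl_nil]
    rw [inner_length, ih]

theorem outer_getElem? (d : Nat → Nat → Prop) [∀ i j, Decidable (d i j)]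
    (m : Nat) (len : Nat → Nat) (t : Nat) (hlen : ∀ i < t, len i = m) (j : Nat) :
    (((List.range t).foldl
        (fun bc i => (List.range (len i)).foldl
          (fun bc2 bit_pos => if d i bit_pos then bc2.set bit_pos 1 else bc2) bc)
        (List.replicate m (0 : Int))))[j]? =
      if j < m then (if ∃ i < t, d i j then some 1 else some 0) else none := by
  induction t with
  | zero =>
    simp only [List.range_zero, List.foldl_nil, List.getElem?_replicate]
    by_cases hj : j < m
    · rw [if_pos hj, if_pos hj, if_neg (by rintro ⟨i, hi, -⟩; omega)]
    · rw [if_neg hj, if_neg hj]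
  | succ t ih =>
    rw [List.range_succ, List.foldl_append]
    simp only [List.foldl_cons, List.foldl_nil]
    have ih' := ih (fun i hi => hlen i (by omega))
    have hlenprev : (((List.range t).foldl
        (fun bc i => (List.range (len i)).foldl
          (fun bc2 bit_pos => if d i bit_pos then bc2.set bit_pos 1 else bc2) bc)
        (List.replicate m (0 : Int)))).length = m := by
      rw [outer_length]; simp
    rw [hlen t (Nat.lt_succ_self t),
        inner_getElem? (d t) m
          (((List.range t).foldl
            (fun bc i => (List.range (len i)).foldl
              (fun bc2 bit_pos => if d i bit_pos then bc2.set bit_pos 1 else bc2) bc)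
            (List.replicate m (0 : Int)))) j,
        hlenprev, ih']
    have hiff : (∃ i < t + 1, d i j) ↔ ((∃ i < t, d i j) ∨ d t j) := by
      constructor
      · rintro ⟨i, hi, hdi⟩
        rcases Nat.lt_succ_iff_lt_or_eq.mp hi with h | h
        · exact Or.inl ⟨i, h, hdi⟩
        · exact Or.inr (h ▸ hdi)
      · rintro (⟨i, hi, hdi⟩ | h)
        · exact ⟨i, by omega, hdi⟩
        · exact ⟨t, Nat.lt_succ_self t, h⟩
    simp only [hiff]
    by_cases hj : j < m
    · by_cases hdt : d t j
      · have hor : (∃ i < t, d i j) ∨ d t j := Or.inr hdt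
        simp only [if_pos (And.intro hj hdt), if_pos hj, if_pos hor]
      · have hand : ¬ (j < m ∧ d t j) := fun h => hdt h.2
        by_cases hex : ∃ i < t, d i j
        · have hor : (∃ i < t, d i j) ∨ d t j := Or.inl hex
          simp only [if_neg hand, if_pos hj, if_pos hex, if_pos hor]
        · have hor : ¬ ((∃ i < t, d i j) ∨ d t j) := by
            rintro (h | h)
            · exact hex h
            · exact hdt h
          simp only [if_neg hand, if_pos hj, if_neg hex, if_neg hor]
    · have hand : ¬ (j < m ∧ d t j) := fun h => hj h.1
      simp only [if_neg hand, if_neg hj]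

-- chain of equalities: all adjacent pairs agree ↔ everything agrees with index 0
theorem chain_iff {α : Type} (f : Nat → α) (n : Nat) :
    (∀ i, i + 1 < n → f i = f (i + 1)) ↔ (∀ i < n, f i = f 0) := by
  constructor
  · intro h i hi
    induction i with
    | zero => rfl
    | succ i ihh => rw [← h i hi]; exact ihh (by omega)
  · intro h i hi
    rw [h i (by omega), h (i+1) hi]

-- a nodup list with all members equal has at most one member
theorem nodup_all_eq_length_le_one {α : Type} (l : List α) (hnd : l.Nodup)
    (h : ∀ x ∈ l, ∀ y ∈ l, x = y) : l.length ≤ 1 := by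
  match l with
  | [] => simp
  | [a] => simp
  | a :: b :: rest =>
    exfalso
    have : a = b := h a (by simp) b (by simp)
    simp [this] at hnd

-- a set built from a nonempty list has size 1 iff all the list's members coincide
theorem set_len_one_iff {α : Type} [BEq α] [LawfulBEq α] (l : List α) (hl : l ≠ []) :
    PySem.Set.len (PySem.Set.ofList l) = 1 ↔ ∀ x ∈ l, ∀ y ∈ l, x = y := by
  have hlen : PySem.Set.len (PySem.Set.ofList l) = ((PySem.Set.ofList l).length : Int) := rfl
  rw [hlen]
  constructor
  · intro h1 x hx y hy
    have h2 : (PySem.Set.ofList l).length = 1 := by omega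
    obtain ⟨a, ha⟩ := List.length_eq_one_iff.mp h2
    have hx' : x ∈ PySem.Set.ofList l := (PySem.Set.mem_ofList l x).mpr hx
    have hy' : y ∈ PySem.Set.ofList l := (PySem.Set.mem_ofList l y).mpr hy
    rw [ha] at hx' hy'
    simp at hx' hy'
    rw [hx', hy']
  · intro h
    have hle : (PySem.Set.ofList l).length ≤ 1 := by
      apply nodup_all_eq_length_le_one _ (PySem.Set.nodup_ofList l)
      intro x hx y hy
      exact h x ((PySem.Set.mem_ofList l x).mp hx) y ((PySem.Set.mem_ofList l y).mp hy)
    have hge : 1 ≤ (PySem.Set.ofList l).length := by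
      obtain ⟨a, rest, rfl⟩ := List.exists_cons_of_ne_nil hl
      have ha : a ∈ PySem.Set.ofList (a :: rest) := (PySem.Set.mem_ofList _ a).mpr (by simp)
      have := List.length_pos_of_mem ha
      omega
    omega

-- the heart of the equivalence, stated over the truncated rows
theorem core (rows : List (List Char)) (m : Nat) (hn : 2 ≤ rows.length)
    (hm : ∀ r ∈ rows, r.length = m) :
    ((List.range (rows.length - 1)).foldl
        (fun bc i => (List.range (rows.getD i []).length).foldl
          (fun bc2 bit_pos => if (rows.getD i []).getD bit_pos ' ' ≠ (rows.getD (i+1) []).getD bit_pos ' '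
            then bc2.set bit_pos 1 else bc2) bc)
        (List.replicate (rows.getD 0 []).length (0 : Int))).map (fun x => if x = 0 then '1' else '0')
    = (List.range m).map (fun j =>
        if PySem.Set.len (PySem.Set.ofList (rows.map (fun r => r.getD j ' '))) = 1 then '1' else '0') := by
  have hrow : ∀ i, i < rows.length → (rows.getD i []).length = m := by
    intro i hi
    rw [List.getD_eq_getElem rows [] hi]
    exact hm _ (List.getElem_mem hi)
  have h0 : (rows.getD 0 []).length = m := hrow 0 (by omega)
  rw [h0]
  apply List.ext_getElem?
  intro j
  rw [List.getElem?_map, List.getElem?_map,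
      outer_getElem? (fun i bit_pos => (rows.getD i []).getD bit_pos ' ' ≠ (rows.getD (i+1) []).getD bit_pos ' ')
        m (fun i => (rows.getD i []).length) (rows.length - 1)
        (fun i hi => hrow i (by omega)) j]
  by_cases hj : j < m
  · rw [if_pos hj, List.getElem?_range hj]
    have hcol : (∃ i < rows.length - 1,
        (rows.getD i []).getD j ' ' ≠ (rows.getD (i+1) []).getD j ' ') ↔
        ¬ (PySem.Set.len (PySem.Set.ofList (rows.map (fun r => r.getD j ' '))) = 1) := by
      rw [set_len_one_iff _ (by
        intro hnil
        rw [List.map_eq_nil_iff] at hnil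
        subst hnil
        simp at hn)]
      constructor
      · rintro ⟨i, hi, hne⟩ hall
        exact hne (hall _ (List.mem_map.mpr ⟨rows.getD i [], by
            rw [List.getD_eq_getElem rows [] (by omega)]
            exact ⟨List.getElem_mem _, rfl⟩⟩)
          _ (List.mem_map.mpr ⟨rows.getD (i+1) [], by
            rw [List.getD_eq_getElem rows [] (by omega)]
            exact ⟨List.getElem_mem _, rfl⟩⟩))
      · intro hnot
        by_contra hno
        push Not at hno
        have hadj : ∀ i, i + 1 < rows.length →
            (rows.getD i []).getD j ' ' = (rows.getD (i+1) []).getD j ' ' := by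
          intro i hi
          exact hno i (by omega)
        have hall := (chain_iff (fun i => (rows.getD i []).getD j ' ') rows.length).mp hadj
        apply hnot
        intro x hx y hy
        obtain ⟨rx, hrx, rfl⟩ := List.mem_map.mp hx
        obtain ⟨ry, hry, rfl⟩ := List.mem_map.mp hy
        obtain ⟨ix, hix, rfl⟩ := List.mem_iff_getElem.mp hrx
        obtain ⟨iy, hiy, rfl⟩ := List.mem_iff_getElem.mp hry
        have ex : rows[ix] = rows.getD ix [] := (List.getD_eq_getElem rows [] hix).symm
        have ey : rows[iy] = rows.getD iy [] := (List.getD_eq_getElem rows [] hiy).symm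
        rw [ex, ey]
        rw [hall ix hix, hall iy hiy]
    by_cases hex : ∃ i < rows.length - 1,
        (rows.getD i []).getD j ' ' ≠ (rows.getD (i+1) []).getD j ' '
    · rw [if_pos hex]
      simp only [Option.map_some]
      rw [if_neg (by norm_num : ¬ (1 : Int) = 0), if_neg (hcol.mp hex)]
    · rw [if_neg hex]
      simp only [Option.map_some, if_true]
      rw [if_pos (of_not_not (fun hc => hex (hcol.mpr hc)))]
  · rw [if_neg hj, List.getElem?_eq_none (by simpa using hj)]
    simp

-- the minimum length bounds every length
theorem min_le_all (binary_codes : List (List Char)) (hne : binary_codes ≠ []) :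
    ∀ r ∈ binary_codes, ((binary_codes.map List.length).min?).getD 0 ≤ r.length := by
  intro r hr
  cases hmin : (binary_codes.map List.length).min? with
  | none =>
    rw [List.min?_eq_none_iff] at hmin
    simp at hmin
    exact absurd hmin hne
  | some a =>
    have h := (List.min?_eq_some_iff).mp hmin
    simp only [Option.getD_some]
    exact h.2 _ (List.mem_map_of_mem hr)

-- ===== VERDICT (by name: the statement is the Claim_ definition above) =====
theorem find_stable_bits_spec : Claim_equal_find_stable_bits := by
  intro hex_codes _ hpre
  obtain ⟨h2, -⟩ := hpre
  unfold Spec_find_stable_bits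
  simp only [find_stable_bits, find_stable_bits_alt, if_neg (by omega : ¬ hex_codes.length < 2)]
  have hne : hex_codes.map hex_to_binary ≠ [] := by
    intro h
    rw [List.map_eq_nil_iff] at h
    subst h
    simp at h2
  rw [core ((hex_codes.map hex_to_binary).map
        (fun code => code.take (((hex_codes.map hex_to_binary).map List.length).min?.getD 0)))
      (((hex_codes.map hex_to_binary).map List.length).min?.getD 0)
      (by simpa using h2)
      (by
        intro r hr
        obtain ⟨code, hc, rfl⟩ := List.mem_map.mp hr
        rw [List.length_take]
        exact Nat.min_eq_left (min_le_all _ hne _ hc))]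
  simp only [List.map_map, Function.comp_def]
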